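/-
  FROM THE FILE'S BYTES TO THE FACTS THE COMPOSITION NEEDS, for any image given as ONE NUMBER (`#image_nat`, UserX/ImageNat.lean;
  generated per program by c/gen_image.py: `<Prog>/Image.lean`).

      startState_image_any, start_image_any     the file's bytes are in the start state's memory from 100000H, at ANY privilege level `c`
      ImageIsNat im N sz        `im` is the image whose bytes are the number `N` (`sz` bytes): `Image.OK`, and the whole file, as the
                                number, is in the start state's memory (`CodeNat mem 100000H N sz`). ONE theorem per program
                                (`<Prog>.image_isNat`), from `start_image_any` and `CodeAt.ofImageNat`
      FileHas N sz a n M        "the `n` bytes at address `a` of the file are the number `M`": `a` is inside the file as loaded at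
                                100000H and `(N >>> (8 * (a - 100000H))) % 2 ^ (8 * n) = M` — a CLOSED, DECIDABLE fact about numbers:
                                `by decide +kernel`, three big-number operations of the kernel whatever the offset (≈ 1 ms)
      image_slice, image_readLE `FileHas …` ⊢ the start state has `CodeNat mem a M n`; its little-endian load there gives `M`
      image_hasCode             `FileHas … entry.toNat size M` ⊢ `HasCodeNat (startLayout c hc) (startU …) entry M size`: one per
                                function, all closed the same way (`by decide +kernel`)
      ctorIn_of, descsIn_of     `.init_array` and the descriptor table of the registered globals from `FileHas` facts: the two data
                                fields of `Top.ImageData`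

  KERNEL HYGIENE: the kernel knows no `irreducible`. Every fact here is about a VARIABLE image `im` and variable numbers `N sz`;
  a program instantiates them with constants, so that all comparisons at the instance are syntactic (a definitional comparison in
  which the byte array stands on one side and something that only REDUCES to it on the other can unfold a 100,000-element
  `Array.ofFn`: measured in proofs.vorbis at 299 s, 46 GB, then a timeout).
-/
import ProgX.Top
import UserX.ImageNat
namespace ProgX
open X86 X86.User Asan

/- The slice equations contain `2 ^ (8 * n)` with `n` up to several KB: above the elaborator's default threshold for evaluating a
power (the kernel has none). -/
set_option exponentiation.threshold 2000000

/-! ### The start state's memory on the image, at any privilege level -/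

/-- The file's bytes are in the flat memory of the start state from 1 MB, whatever the privilege level (the model's
`User.startState_image` goes through the page tables of `c = 0` and `c = 3`; the physical memory above 1 MB does not depend
on them). -/
theorem startState_image_any (c : Nat) (img : ByteArray) (entry rsp : Word) (_hs : img.size ≤ 0x1000000)
    (i : Nat) (hi : i < img.size) :
    (User.startState c img entry rsp).mem.read (0x100000 + UInt64.ofNat i) = img.get! i := by
  have hk : (0x100000 : Word).toNat + img.size < 2 ^ 64 := by
    simp only [UInt64.reduceToNat]
    omega
  show (Boot.loadImage (bootMachine c) 0x100000 img).phys.read _ = _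
  rw [loadImage_phys]
  exact read_loadPhys_in _ _ _ i hk hi

/-- **The image's bytes are in memory from 100000H, at any privilege level.** -/
theorem start_image_any (im : Image) (him : im.OK) (c : Nat) (inp : List UInt8) :
    CodeAt (startU im c inp).mem 0x100000 im.bytes.toList := by
  intro i hi
  have hsz := him.size
  have hend := him.end_le
  have hi' : i < im.bytes.size := by
    rw [Array.length_toList] at hi
    exact hi
  have hfile : i < (file im inp).size := by
    rw [file_size]
    omega
  have hread : (startU im c inp).mem.read (0x100000 + UInt64.ofNat i) = (file im inp).get! i :=
    startState_image_any c (file im inp) im.entry RSP0 (file_size_le im inp) i hfile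
  rw [hread, file_get im inp i (by omega)]
  unfold memByte
  have c1 : ¬ (0xC00000 ≤ 0x100000 + i ∧ 0x100000 + i < 0xE00000) := by omega
  have c2 : ¬ (0x200000 ≤ 0x100000 + i ∧ 0x100000 + i < 0x200000 + inp.length) := by omega
  have c3 : ¬ ((0x1FF000 ≤ 0x100000 + i ∧ 0x100000 + i < 0x1FF020) ∨ (0x1FF030 ≤ 0x100000 + i ∧ 0x100000 + i < 0x1FF040)) := by
    omega
  have c4 : 0x100000 ≤ 0x100000 + i ∧ 0x100000 + i < 0x100000 + im.bytes.size := by omega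
  rw [if_neg c1, if_neg c2, if_neg c3, if_pos c4]
  have e2 : 0x100000 + i - 0x100000 = i := by omega
  rw [e2, Array.getD_eq_getD_getElem?, Array.getElem?_eq_getElem hi', Option.getD_some, Array.getElem_toList]

/-! ### An image given as a number -/

/-- **`im` is the image whose file is the number `N` (`sz` bytes).** -/
structure ImageIsNat (im : Image) (N sz : Nat) : Prop where
  ok : im.OK
  /-- the file, loaded at 100000H, ends inside the user region of the start layout -/
  end_le : 0x100000 + sz ≤ 0xE00000
  /-- the whole file, as the number, is in the start state's memory from 100000H -/
  codeNat : ∀ (c : Nat) (inp : List UInt8), CodeNat (startU im c inp).mem 0x100000 N sz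

/-- **How a program proves `ImageIsNat`**: its image's bytes are `imageOfNat N sz` (a VARIABLE `bytes` with the two facts the
generated `<Prog>/Image.lean` proves of the array: its size, and `CodeAt … bytes.toList → CodeNat … N sz`). -/
theorem ImageIsNat.of_bytes {im : Image} {N sz : Nat} (him : im.OK) (hsize : im.bytes.size = sz)
    (hnat : ∀ {mem : Mem} {base : Word}, CodeAt mem base im.bytes.toList → CodeNat mem base N sz) : ImageIsNat im N sz where
  ok := him
  end_le := by
    have h1 := him.size
    have h2 := him.end_le
    omega
  codeNat := fun c inp => hnat (start_image_any im him c inp)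

/-- **The `n` bytes at address `a` of the file are the number `M`**: a closed fact about numbers (the address is inside the file as
loaded at 100000H; the slice of the file's number there is `M`), which the kernel decides with three big-number operations. -/
abbrev FileHas (N sz a n M : Nat) : Prop :=
  0x100000 ≤ a ∧ a + n ≤ 0x100000 + sz ∧ (N >>> (8 * (a - 0x100000))) % 2 ^ (8 * n) = M

section
variable {im : Image} {N sz : Nat}

/-- **What the file has at `a` is in the start state's memory at `a`.** -/
theorem image_slice (hI : ImageIsNat im N sz) (c : Nat) (inp : List UInt8) (a n M : Nat) (h : FileHas N sz a n M) :
    CodeNat (startU im c inp).mem (UInt64.ofNat a) M n := by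
  have hoff : a - 0x100000 + n ≤ sz := by
    have h1 : 0x100000 ≤ a := h.1
    have h2 : a + n ≤ 0x100000 + sz := h.2.1
    clear h
    omega
  have hs := (hI.codeNat c inp).slice (a - 0x100000) n M hoff h.2.2
  have ea : (0x100000 : Word) + UInt64.ofNat (a - 0x100000) = UInt64.ofNat a := by
    have h1 : 0x100000 ≤ a := h.1
    have e0 : (0x100000 : Word) = UInt64.ofNat 0x100000 := rfl
    have e1 : 0x100000 + (a - 0x100000) = a := by
      clear hs h
      omega
    rw [e0, ← UInt64.ofNat_add, e1]
  rw [ea] at hs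
  exact hs

/-- **The little-endian load of `n` bytes at address `a` of the image gives what the file has there.** -/
theorem image_readLE (hI : ImageIsNat im N sz) (c : Nat) (inp : List UInt8) (a n M : Nat) (h : FileHas N sz a n M) :
    (startU im c inp).mem.readLE (UInt64.ofNat a) n = M := by
  rw [(image_slice hI c inp a n M h).readLE, ← h.2.2]
  have e256 : 256 ^ n = 2 ^ (8 * n) := by
    rw [Nat.pow_mul]
  rw [e256, Nat.mod_mod]

/-- **The code of a function is in the start state**, from "the file has the function's number at its entry". -/
theorem image_hasCode (hI : ImageIsNat im N sz) (c : Nat) (hc : c = 0 ∨ c = 3) (inp : List UInt8) (entry : Word) (M size : Nat)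
    (h : FileHas N sz entry.toNat size M) :
    HasCodeNat (startLayout c hc) (startU im c inp) entry M size := by
  have hs := image_slice hI c inp entry.toNat size M h
  rw [UInt64.ofNat_toNat] at hs
  have hle : entry.toNat + size ≤ 0xE00000 := by
    have h2 : entry.toNat + size ≤ 0x100000 + sz := h.2.1
    have h3 := hI.end_le
    clear h hs
    omega
  exact ⟨hs, start_layout_has c hc entry size h.1 hle⟩

/-- **`.init_array` is in the image**: one entry, the address of the constructor; from the two closed facts. -/
theorem ctorIn_of (hI : ImageIsNat im N sz) (S : RtSymbols) (hend : S.initArrayEnd = S.initArrayStart + 8)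
    (hfile : FileHas N sz S.initArrayStart 8 S.ctor.toNat) (c : Nat) (inp : List UInt8) :
    CtorIn (startU im c inp).mem S := by
  refine ⟨hend, ?_⟩
  rw [image_readLE hI c inp _ 8 _ hfile, UInt64.ofNat_toNat]

/-- **The descriptor table of the registered globals (`.data..LASAN0`) is in the image**, from the three quadwords of every
descriptor in the file. -/
theorem descsIn_of (hI : ImageIsNat im N sz) (table : Nat) (descs : List GlobalDesc)
    (hnum : ∀ i (h : i < descs.length),
      FileHas N sz (table + 64 * i) 8 descs[i].beg ∧
      FileHas N sz (table + 64 * i + 8) 8 descs[i].size ∧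
      FileHas N sz (table + 64 * i + 16) 8 descs[i].sizeRz)
    (c : Nat) (inp : List UInt8) : DescsIn (startU im c inp).mem table descs := by
  intro i h
  obtain ⟨n1, n2, n3⟩ := hnum i h
  exact ⟨image_readLE hI c inp _ 8 _ n1, image_readLE hI c inp _ 8 _ n2, image_readLE hI c inp _ 8 _ n3⟩

end

end ProgX
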